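-- pv_equiv track=rewrite | github.com/YoheiFunakoshi/paired-fastq-igblast-airr-tsv | src/airr_igblast_paired/pair_summary.py | _counts_rows
-- ===== SOURCE A (Python) =====
-- COUNTS_FIELDNAMES = [
--     "final_v_call",
--     "final_d_call",
--     "final_j_call",
--     "final_junction_aa",
--     "read_pair_count",
--     "match_count",
--     "conflict_count",
--     "r1_only_count",
--     "r2_only_count",
--     "none_count",
--     "productive_true_count",
--     "productive_false_count",
--     "usable_for_qasas_count",
-- ]
--
-- def _counts_rows(integrated_rows: list[dict[str, str]]) -> list[dict[str, str]]:
--     counts: dict[tuple[str, str, str], dict[str, int | str]] = {}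
--     for row in integrated_rows:
--         key = (
--             row.get("final_v_call", ""),
--             row.get("final_d_call", ""),
--             row.get("final_j_call", ""),
--             row.get("final_junction_aa", ""),
--         )
--         bucket = counts.setdefault(
--             key,
--             {
--                 "final_v_call": key[0],
--                 "final_d_call": key[1],
--                 "final_j_call": key[2],
--                 "final_junction_aa": key[3],
--                 "read_pair_count": 0,
--                 "match_count": 0,
--                 "conflict_count": 0,
--                 "r1_only_count": 0,
--                 "r2_only_count": 0,
--                 "none_count": 0,
--                 "productive_true_count": 0,
--                 "productive_false_count": 0,
--                 "usable_for_qasas_count": 0,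
--             },
--         )
--         bucket["read_pair_count"] = int(bucket["read_pair_count"]) + 1
--         status_key = row.get("junction_aa_status", "none")
--         if status_key not in {"match", "conflict", "r1_only", "r2_only", "none"}:
--             status_key = "none"
--         bucket[f"{status_key}_count"] = int(bucket[f"{status_key}_count"]) + 1
--
--         productive = row.get("final_productive", "").strip().lower()
--         if productive in {"t", "true", "yes", "1"}:
--             bucket["productive_true_count"] = int(bucket["productive_true_count"]) + 1
--         elif productive in {"f", "false", "no", "0"}:
--             bucket["productive_false_count"] = int(bucket["productive_false_count"]) + 1
--
--         if row.get("usable_for_qasas", "").strip().lower() == "true":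
--             bucket["usable_for_qasas_count"] = int(bucket["usable_for_qasas_count"]) + 1
--
--     sorted_rows = sorted(
--         counts.values(),
--         key=lambda item: (
--             -int(item["read_pair_count"]),
--             str(item["final_v_call"]),
--             str(item["final_d_call"]),
--             str(item["final_j_call"]),
--             str(item["final_junction_aa"]),
--         ),
--     )
--     return [{field: str(row[field]) for field in COUNTS_FIELDNAMES} for row in sorted_rows]
-- ===== SOURCE B (Python) =====
-- COUNTS_FIELDNAMES = [
--     "final_v_call",
--     "final_d_call",
--     "final_j_call",
--     "final_junction_aa",
--     "read_pair_count",
--     "match_count",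
--     "conflict_count",
--     "r1_only_count",
--     "r2_only_count",
--     "none_count",
--     "productive_true_count",
--     "productive_false_count",
--     "usable_for_qasas_count",
-- ]
--
-- _STATUSES = ("match", "conflict", "r1_only", "r2_only", "none")
-- _TRUTHY = ("t", "true", "yes", "1")
-- _FALSY = ("f", "false", "no", "0")
--
--
-- def _key_of(row):
--     return (
--         row.get("final_v_call", ""),
--         row.get("final_d_call", ""),
--         row.get("final_j_call", ""),
--         row.get("final_junction_aa", ""),
--     )
--
--
-- def _status_of(row):
--     s = row.get("junction_aa_status", "none")
--     return s if s in _STATUSES else "none"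
--
--
-- def _bucket_of(key, grp):
--     statuses = [_status_of(r) for r in grp]
--     prods = [r.get("final_productive", "").strip().lower() for r in grp]
--     return {
--         "final_v_call": key[0],
--         "final_d_call": key[1],
--         "final_j_call": key[2],
--         "final_junction_aa": key[3],
--         "read_pair_count": len(grp),
--         "match_count": statuses.count("match"),
--         "conflict_count": statuses.count("conflict"),
--         "r1_only_count": statuses.count("r1_only"),
--         "r2_only_count": statuses.count("r2_only"),
--         "none_count": statuses.count("none"),
--         "productive_true_count": sum(1 for p in prods if p in _TRUTHY),
--         "productive_false_count": sum(1 for p in prods if p in _FALSY),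
--         "usable_for_qasas_count": sum(
--             1 for r in grp if r.get("usable_for_qasas", "").strip().lower() == "true"
--         ),
--     }
--
--
-- def _counts_rows(integrated_rows):
--     rows_sorted = sorted(integrated_rows, key=_key_of)
--     # split the sorted rows into consecutive runs of equal key
--     groups = []
--     cur = []
--     for row in rows_sorted:
--         if cur and _key_of(cur[0]) == _key_of(row):
--             cur.append(row)
--         else:
--             if cur:
--                 groups.append(cur)
--             cur = [row]
--     if cur:
--         groups.append(cur)
--     buckets = [_bucket_of(_key_of(grp[0]), grp) for grp in groups]
--     buckets.sort(
--         key=lambda b: (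
--             -b["read_pair_count"],
--             b["final_v_call"],
--             b["final_d_call"],
--             b["final_j_call"],
--             b["final_junction_aa"],
--         )
--     )
--     return [{field: str(b[field]) for field in COUNTS_FIELDNAMES} for b in buckets]
-- ===== Notes on version B (the rewrite author's own statement) =====
-- stated objective: alternative
-- what changed: Replaces the hash-based aggregation (a dict of mutable per-key buckets updated field-by-field for every row) with sort-based grouping: rows are sorted by the key tuple, split into consecutive equal-key runs by one flush pass, and each bucket's counters are computed declaratively with count()/sum() over its run; the injective final sort key makes the output identical.
import Mathlib
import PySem

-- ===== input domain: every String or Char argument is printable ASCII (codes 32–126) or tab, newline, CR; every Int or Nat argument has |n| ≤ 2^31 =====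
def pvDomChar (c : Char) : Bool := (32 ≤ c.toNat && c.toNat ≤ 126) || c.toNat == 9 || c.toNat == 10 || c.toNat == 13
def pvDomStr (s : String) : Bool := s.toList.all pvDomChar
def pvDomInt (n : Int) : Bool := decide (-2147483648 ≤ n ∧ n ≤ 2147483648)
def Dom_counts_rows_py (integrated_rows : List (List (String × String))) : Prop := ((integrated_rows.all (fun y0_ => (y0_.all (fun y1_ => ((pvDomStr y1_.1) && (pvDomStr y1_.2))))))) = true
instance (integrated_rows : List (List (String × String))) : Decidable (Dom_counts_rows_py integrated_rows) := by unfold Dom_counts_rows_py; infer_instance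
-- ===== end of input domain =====

-- B replaces A's hash-based aggregation (dict of mutable buckets) by sort-based grouping
-- (sort rows by key, split consecutive runs, count each run declaratively); objective: alternative.

-- helpers shared by both ports (both Pythons contain these very expressions verbatim):
-- row.get(k, dflt) on the association-list representation of a dict (first match)
def pvRowGet (row : List (String × String)) (k dflt : String) : String :=
  (PySem.Dict.mk row).getD k dflt

abbrev PvK := String × String × String × String

-- the grouping key (row.get of the four final_* fields)
def pvKeyOf (row : List (String × String)) : PvK :=
  (pvRowGet row "final_v_call" "", pvRowGet row "final_d_call" "",
   pvRowGet row "final_j_call" "", pvRowGet row "final_junction_aa" "")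

-- Python compares tuples of strings lexicographically: encode a 4-tuple in the Lex order
def pvLex4 (k : PvK) : Lex (String × Lex (String × Lex (String × String))) :=
  toLex (k.1, toLex (k.2.1, toLex (k.2.2.1, k.2.2.2)))

-- status normalisation: row.get("junction_aa_status", "none"), whitelist fallback to "none"
def pvStatusOf (row : List (String × String)) : String :=
  let s := pvRowGet row "junction_aa_status" "none"
  if s == "match" || s == "conflict" || s == "r1_only" || s == "r2_only" || s == "none" then s
  else "none"

-- row.get("final_productive", "").strip().lower()
def pvProdOf (row : List (String × String)) : String :=
  PySem.Str.lower (PySem.Str.strip (pvRowGet row "final_productive" ""))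

-- row.get("usable_for_qasas", "").strip().lower() == "true"
def pvUsableOf (row : List (String × String)) : Bool :=
  PySem.Str.lower (PySem.Str.strip (pvRowGet row "usable_for_qasas" "")) == "true"

-- one aggregation bucket: the four key fields and the nine counters (Python: a fixed-shape dict)
structure PvBucket where
  v : String
  d : String
  j : String
  jaa : String
  rpc : Int
  mm : Int
  mc : Int
  m1 : Int
  m2 : Int
  mn : Int
  pt : Int
  pf : Int
  us : Int
deriving DecidableEq, Repr

-- the final sort key: (-read_pair_count, v, d, j, junction_aa), Python-lexicographic
def pvSortKey (b : PvBucket) : Lex (Int × Lex (String × Lex (String × Lex (String × String)))) :=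
  toLex (-b.rpc, pvLex4 (b.v, b.d, b.j, b.jaa))

-- {field: str(row[field]) for field in COUNTS_FIELDNAMES}  (str of a str is itself)
def pvFormat (b : PvBucket) : List (String × String) :=
  [("final_v_call", b.v), ("final_d_call", b.d), ("final_j_call", b.j),
   ("final_junction_aa", b.jaa),
   ("read_pair_count", PySem.Int.toStr b.rpc), ("match_count", PySem.Int.toStr b.mm),
   ("conflict_count", PySem.Int.toStr b.mc), ("r1_only_count", PySem.Int.toStr b.m1),
   ("r2_only_count", PySem.Int.toStr b.m2), ("none_count", PySem.Int.toStr b.mn),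
   ("productive_true_count", PySem.Int.toStr b.pt),
   ("productive_false_count", PySem.Int.toStr b.pf),
   ("usable_for_qasas_count", PySem.Int.toStr b.us)]

-- ===== PORT A =====

-- the setdefault default: key fields, all counters 0
def pvInit (k : PvK) : PvBucket :=
  ⟨k.1, k.2.1, k.2.2.1, k.2.2.2, 0, 0, 0, 0, 0, 0, 0, 0, 0⟩

-- bucket[f"{status_key}_count"] += 1; status_key is one of the five whitelisted statuses,
-- so the computed dict key is ported as a five-way case split
def pvBump (b : PvBucket) (s : String) : PvBucket :=
  if s == "match" then { b with mm := b.mm + 1 }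
  else if s == "conflict" then { b with mc := b.mc + 1 }
  else if s == "r1_only" then { b with m1 := b.m1 + 1 }
  else if s == "r2_only" then { b with m2 := b.m2 + 1 }
  else { b with mn := b.mn + 1 }

-- the per-row mutation of A's bucket, in A's statement order
def pvUpd (b0 : PvBucket) (row : List (String × String)) : PvBucket :=
  let b1 := { b0 with rpc := b0.rpc + 1 }
  let b2 := pvBump b1 (pvStatusOf row)
  let p := pvProdOf row
  let b3 :=
    if p == "t" || p == "true" || p == "yes" || p == "1" then { b2 with pt := b2.pt + 1 }
    else if p == "f" || p == "false" || p == "no" || p == "0" then { b2 with pf := b2.pf + 1 }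
    else b2
  if pvUsableOf row then { b3 with us := b3.us + 1 } else b3

-- the body of A's `for row in integrated_rows` loop
def pvStepA (counts : PySem.Dict PvK PvBucket) (row : List (String × String)) :
    PySem.Dict PvK PvBucket :=
  let k := pvKeyOf row
  let counts1 := counts.setdefault k (pvInit k)
  let bucket := counts1.getD k (pvInit k)   -- the value setdefault returned
  counts1.insert k (pvUpd bucket row)

def counts_rows_py (integrated_rows : List (List (String × String))) :
    List (List (String × String)) :=
  let counts := integrated_rows.foldl pvStepA PySem.Dict.empty
  (PySem.List.sorted counts.values pvSortKey false).map pvFormat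

-- ===== PORT B =====

-- _bucket_of: the counters of one group, computed declaratively (len / count / sum)
def pvBucketOf (k : PvK) (grp : List (List (String × String))) : PvBucket :=
  let statuses := grp.map pvStatusOf
  let prods := grp.map pvProdOf
  { v := k.1, d := k.2.1, j := k.2.2.1, jaa := k.2.2.2,
    rpc := (grp.length : Int),
    mm := (statuses.count "match" : Int),
    mc := (statuses.count "conflict" : Int),
    m1 := (statuses.count "r1_only" : Int),
    m2 := (statuses.count "r2_only" : Int),
    mn := (statuses.count "none" : Int),
    pt := (prods.countP (fun p => p == "t" || p == "true" || p == "yes" || p == "1") : Int),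
    pf := (prods.countP (fun p => p == "f" || p == "false" || p == "no" || p == "0") : Int),
    us := (grp.countP pvUsableOf : Int) }

-- the body of B's run-splitting loop over the sorted rows (state: groups so far, current run)
def pvFlushStep (st : List (List (List (String × String))) × List (List (String × String)))
    (row : List (String × String)) :
    List (List (List (String × String))) × List (List (String × String)) :=
  match st with
  | (groups, cur) =>
    match cur with
    | c0 :: _ =>
      if pvKeyOf c0 == pvKeyOf row then (groups, cur ++ [row])
      else (groups ++ [cur], [row])
    | [] => (groups, [row])

def counts_rows_py_alt (integrated_rows : List (List (String × String))) :
    List (List (String × String)) :=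
  let rowsSorted := PySem.List.sorted integrated_rows (fun r => pvLex4 (pvKeyOf r)) false
  let st := rowsSorted.foldl pvFlushStep ([], [])
  let groups := st.1 ++ (if st.2.isEmpty then [] else [st.2])   -- trailing `if cur: groups.append(cur)`
  let buckets := groups.map (fun grp => pvBucketOf (pvKeyOf (grp.headD [])) grp)  -- grp[0]; runs are nonempty
  (PySem.List.sorted buckets pvSortKey false).map pvFormat

-- ===== PRECONDITION & SPEC =====
def Spec_counts_rows_py (integrated_rows : List (List (String × String))) (out : List (List (String × String))) : Prop := out = counts_rows_py_alt integrated_rows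
instance (integrated_rows : List (List (String × String))) (out : List (List (String × String))) : Decidable (Spec_counts_rows_py integrated_rows out) := by unfold Spec_counts_rows_py; infer_instance

-- ===== CLAIM (what is proved, stated in full; the proofs are below) =====
def Claim_equal_counts_rows_py : Prop := ∀ (integrated_rows : List (List (String × String))), Dom_counts_rows_py integrated_rows → Spec_counts_rows_py integrated_rows (counts_rows_py integrated_rows)

-- ===== LEMMAS AND PROOFS =====

lemma pvStatus_whitelist (row : List (String × String)) :
    pvStatusOf row = "match" ∨ pvStatusOf row = "conflict" ∨ pvStatusOf row = "r1_only" ∨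
      pvStatusOf row = "r2_only" ∨ pvStatusOf row = "none" := by
  unfold pvStatusOf
  dsimp only
  set s := pvRowGet row "junction_aa_status" "none" with hs
  split
  · rename_i h
    simp only [Bool.or_eq_true, beq_iff_eq] at h
    tauto
  · tauto

lemma pvLex4_inj : Function.Injective pvLex4 := by
  intro a b h
  simp only [pvLex4, toLex_inj, Prod.mk.injEq] at h
  obtain ⟨h1, h2, h3, h4⟩ := h
  exact Prod.ext h1 (Prod.ext h2 (Prod.ext h3 h4))

lemma pvStepA_eq (d : PySem.Dict PvK PvBucket) (row : List (String × String)) :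
    pvStepA d row
      = d.insert (pvKeyOf row) (pvUpd (d.getD (pvKeyOf row) (pvInit (pvKeyOf row))) row) := by
  unfold pvStepA
  dsimp only
  rcases hc : d.contains (pvKeyOf row) with hf | ht
  · rw [PySem.Dict.setdefault_of_not_contains d _ hc,
      PySem.Dict.getD_insert_self, PySem.Dict.insert_insert_self,
      PySem.Dict.getD_of_not_contains d _ hc]
  · rw [PySem.Dict.setdefault_of_contains d _ hc]

lemma pvUpd_eq (b : PvBucket) (row : List (String × String)) :
    pvUpd b row =
      { v := b.v, d := b.d, j := b.j, jaa := b.jaa,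
        rpc := b.rpc + 1,
        mm := b.mm + (if pvStatusOf row == "match" then 1 else 0),
        mc := b.mc + (if pvStatusOf row == "conflict" then 1 else 0),
        m1 := b.m1 + (if pvStatusOf row == "r1_only" then 1 else 0),
        m2 := b.m2 + (if pvStatusOf row == "r2_only" then 1 else 0),
        mn := b.mn + (if pvStatusOf row == "none" then 1 else 0),
        pt := b.pt + (if pvProdOf row == "t" || pvProdOf row == "true" || pvProdOf row == "yes" || pvProdOf row == "1" then 1 else 0),
        pf := b.pf + (if pvProdOf row == "f" || pvProdOf row == "false" || pvProdOf row == "no" || pvProdOf row == "0" then 1 else 0),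
        us := b.us + (if pvUsableOf row then 1 else 0) } := by
  have hdisj : ∀ p : String, (p == "t" || p == "true" || p == "yes" || p == "1") = true →
      (p == "f" || p == "false" || p == "no" || p == "0") = false := by
    intro p h
    simp only [Bool.or_eq_true, beq_iff_eq] at h ⊢
    rcases h with ((h | h) | h) | h <;> subst h <;> simp
  unfold pvUpd pvBump
  dsimp only
  rcases pvStatus_whitelist row with h | h | h | h | h <;> rw [h] <;>
    by_cases hT : (pvProdOf row == "t" || pvProdOf row == "true" || pvProdOf row == "yes" || pvProdOf row == "1") = true <;>
    by_cases hU : pvUsableOf row = true <;>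
    first
      | simp [hT, hdisj _ hT, hU] at *
      | (by_cases hF : (pvProdOf row == "f" || pvProdOf row == "false" || pvProdOf row == "no" || pvProdOf row == "0") = true <;>
          simp [hT, hU, hF] at *)

lemma pvFoldUpd (grp : List (List (String × String))) (b : PvBucket) :
    grp.foldl pvUpd b =
      { v := b.v, d := b.d, j := b.j, jaa := b.jaa,
        rpc := b.rpc + grp.length,
        mm := b.mm + (grp.countP (fun r => pvStatusOf r == "match") : Int),
        mc := b.mc + (grp.countP (fun r => pvStatusOf r == "conflict") : Int),
        m1 := b.m1 + (grp.countP (fun r => pvStatusOf r == "r1_only") : Int),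
        m2 := b.m2 + (grp.countP (fun r => pvStatusOf r == "r2_only") : Int),
        mn := b.mn + (grp.countP (fun r => pvStatusOf r == "none") : Int),
        pt := b.pt + (grp.countP (fun r => pvProdOf r == "t" || pvProdOf r == "true" || pvProdOf r == "yes" || pvProdOf r == "1") : Int),
        pf := b.pf + (grp.countP (fun r => pvProdOf r == "f" || pvProdOf r == "false" || pvProdOf r == "no" || pvProdOf r == "0") : Int),
        us := b.us + (grp.countP pvUsableOf : Int) } := by
  induction grp generalizing b with
  | nil => simp
  | cons x t ih =>
    rw [List.foldl_cons, ih, pvUpd_eq]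
    simp only [List.countP_cons, List.length_cons, PvBucket.mk.injEq, true_and]
    refine ⟨?_, ?_, ?_, ?_, ?_, ?_, ?_, ?_, ?_⟩ <;> (try split_ifs) <;> push_cast <;> ring

def pvAgg (l : List (List (String × String))) (k : PvK) : PvBucket :=
  (l.filter (fun r => pvKeyOf r == k)).foldl pvUpd (pvInit k)

lemma pvAgg_eq (l : List (List (String × String))) (k : PvK) :
    pvAgg l k = pvBucketOf k (l.filter (fun r => pvKeyOf r == k)) := by
  rw [pvAgg, pvFoldUpd, pvBucketOf]
  simp only [pvInit, List.count_eq_countP, List.countP_map, Function.comp_def, zero_add]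

lemma pvBucketOf_perm (k : PvK) {g1 g2 : List (List (String × String))} (h : g1.Perm g2) :
    pvBucketOf k g1 = pvBucketOf k g2 := by
  simp only [pvBucketOf]
  rw [h.length_eq, ((h.map pvStatusOf).count_eq "match"), ((h.map pvStatusOf).count_eq "conflict"),
    ((h.map pvStatusOf).count_eq "r1_only"), ((h.map pvStatusOf).count_eq "r2_only"),
    ((h.map pvStatusOf).count_eq "none"), ((h.map pvProdOf).countP_eq _), ((h.map pvProdOf).countP_eq _),
    (h.countP_eq pvUsableOf)]

def pvRuns : List (List (String × String)) → List (List (List (String × String)))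
  | [] => []
  | x :: xs =>
    (x :: xs.takeWhile (fun r => pvKeyOf x == pvKeyOf r)) ::
      pvRuns (xs.dropWhile (fun r => pvKeyOf x == pvKeyOf r))
termination_by l => l.length
decreasing_by
  simpa using Nat.lt_succ_of_le (List.length_dropWhile_le _ _)

lemma pvFlushFold (xs : List (List (String × String)))
    (out : List (List (List (String × String)))) (c0 : List (String × String))
    (cs : List (List (String × String))) :
    (let st := xs.foldl pvFlushStep (out, c0 :: cs)
     st.1 ++ (if st.2.isEmpty then [] else [st.2]))
      = out ++ ((c0 :: (cs ++ xs.takeWhile (fun r => pvKeyOf c0 == pvKeyOf r))) ::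
          pvRuns (xs.dropWhile (fun r => pvKeyOf c0 == pvKeyOf r))) := by
  induction xs generalizing out c0 cs with
  | nil => simp [pvRuns]
  | cons x t ih =>
    rw [List.foldl_cons]
    rcases hk : (pvKeyOf c0 == pvKeyOf x) with _ | _
    · have hstep : pvFlushStep (out, c0 :: cs) x = (out ++ [c0 :: cs], [x]) := by
        simp [pvFlushStep, hk]
      rw [hstep]
      have := ih (out ++ [c0 :: cs]) x []
      simp only [List.nil_append] at this
      rw [this]
      rw [List.takeWhile_cons, List.dropWhile_cons]
      simp only [hk, Bool.false_eq_true, if_false]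
      rw [pvRuns]
      simp
    · have hstep : pvFlushStep (out, c0 :: cs) x = (out, (c0 :: cs) ++ [x]) := by
        simp [pvFlushStep, hk]
      rw [hstep]
      have := ih out c0 (cs ++ [x])
      simp only [List.cons_append, List.append_assoc] at this ⊢
      rw [this]
      rw [List.takeWhile_cons, List.dropWhile_cons]
      simp [hk]

lemma pvFoldlAdd_ne (d' : List PvK) (a : PvK) (h : ∀ x ∈ d', x ≠ a) :
    ∀ s : List PvK, d'.foldl PySem.Set.add (a :: s) = a :: d'.foldl PySem.Set.add s := by
  induction d' with
  | nil => intro s; rfl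
  | cons x t ih =>
    intro s
    have hxa : x ≠ a := h x (by simp)
    have hadd : PySem.Set.add (a :: s) x = a :: PySem.Set.add s x := by
      rcases hm : decide (x ∈ s) with _ | _
      · have hx : x ∉ s := of_decide_eq_false hm
        rw [PySem.Set.add_of_not_mem (by simp [hxa, hx]), PySem.Set.add_of_not_mem hx]
        simp
      · have hx : x ∈ s := of_decide_eq_true hm
        rw [PySem.Set.add_of_mem (by simp [hx]), PySem.Set.add_of_mem hx]
    rw [List.foldl_cons, List.foldl_cons, hadd, ih (fun y hy => h y (by simp [hy]))]

lemma pvOfList_group (a : PvK) (t d : List PvK) (ht : ∀ b ∈ t, b = a) (hd : a ∉ d) :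
    PySem.Set.ofList (a :: (t ++ d)) = a :: PySem.Set.ofList d := by
  rw [PySem.Set.ofList_eq_foldl, List.foldl_cons, List.foldl_append]
  have h1 : PySem.Set.add [] a = [a] := rfl
  have h2 : t.foldl PySem.Set.add [a] = [a] := by
    induction t with
    | nil => rfl
    | cons b tb ihb =>
      have hb : b = a := ht b (by simp)
      rw [List.foldl_cons, hb, PySem.Set.add_of_mem (by simp)]
      exact ihb (fun y hy => ht y (by simp [hy]))
  rw [h1, h2, pvFoldlAdd_ne d a (fun y hy hya => hd (hya ▸ hy)) [], PySem.Set.ofList_eq_foldl]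

lemma pvRuns_spec (xs : List (List (String × String)))
    (h : xs.Pairwise (fun a b => pvLex4 (pvKeyOf a) ≤ pvLex4 (pvKeyOf b))) :
    pvRuns xs
      = (PySem.Set.ofList (xs.map pvKeyOf)).map (fun k => xs.filter (fun r => pvKeyOf r == k)) := by
  induction xs using pvRuns.induct with
  | case1 => simp [pvRuns]
  | case2 x xs ih =>
    rw [List.pairwise_cons] at h
    obtain ⟨h1, hxs⟩ := h
    set p : List (String × String) → Bool := fun r => pvKeyOf x == pvKeyOf r with hp
    set t := xs.takeWhile p with htdef
    set d := xs.dropWhile p with hddef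
    have htd : t ++ d = xs := List.takeWhile_append_dropWhile
    have ht : ∀ r ∈ t, pvKeyOf r = pvKeyOf x := by
      intro r hr
      rw [htdef] at hr
      have h' := List.mem_takeWhile_imp hr
      simp only [hp, beq_iff_eq] at h'
      exact h'.symm
    have hpd : d.Pairwise (fun a b => pvLex4 (pvKeyOf a) ≤ pvLex4 (pvKeyOf b)) :=
      List.Pairwise.sublist (List.dropWhile_sublist p) hxs
    have hd : ∀ r ∈ d, pvKeyOf r ≠ pvKeyOf x := by
      rcases hdd : d with _ | ⟨d0, dt⟩
      · simp
      · have hp0 : p d0 = false := by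
          have := List.head?_dropWhile_not p xs
          rw [← hddef, hdd] at this
          simpa using this
        have hne0 : pvKeyOf d0 ≠ pvKeyOf x := by
          intro he
          simp only [hp, he, beq_self_eq_true] at hp0
          simp at hp0
        intro r hr
        rcases List.mem_cons.mp hr with rfl | hrt
        · exact hne0
        · intro he
          have hd0d : d0 ∈ d := by rw [hdd]; simp
          have hd0xs : d0 ∈ xs := (List.dropWhile_sublist p).subset (hddef ▸ hd0d)
          have hrle : pvLex4 (pvKeyOf d0) ≤ pvLex4 (pvKeyOf r) := by
            rw [hdd] at hpd
            exact (List.pairwise_cons.mp hpd).1 r hrt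
          have hxle : pvLex4 (pvKeyOf x) ≤ pvLex4 (pvKeyOf d0) := h1 d0 hd0xs
          have : pvLex4 (pvKeyOf d0) = pvLex4 (pvKeyOf x) :=
            le_antisymm (he ▸ hrle) hxle
          exact hne0 (pvLex4_inj this)
    have hmap : (x :: xs).map pvKeyOf = pvKeyOf x :: (t.map pvKeyOf ++ d.map pvKeyOf) := by
      rw [← List.map_append, htd]
      rfl
    have hofl : PySem.Set.ofList ((x :: xs).map pvKeyOf)
        = pvKeyOf x :: PySem.Set.ofList (d.map pvKeyOf) := by
      rw [hmap]
      apply pvOfList_group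
      · intro b hb
        obtain ⟨r, hr, rfl⟩ := List.mem_map.mp hb
        exact ht r hr
      · intro hmem
        obtain ⟨r, hr, he⟩ := List.mem_map.mp hmem
        exact hd r hr he
    rw [hofl, List.map_cons]
    have hfilt1 : (x :: xs).filter (fun r => pvKeyOf r == pvKeyOf x) = x :: t := by
      rw [← htd, List.filter_cons]
      simp only [beq_self_eq_true, if_true, List.filter_append]
      rw [List.filter_eq_self.mpr (fun a ha => by simp [ht a ha]),
        List.filter_eq_nil_iff.mpr (fun a ha => by simp [hd a ha])]
      simp
    rw [hfilt1]
    have hfilt2 : ∀ k ∈ PySem.Set.ofList (d.map pvKeyOf),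
        (x :: xs).filter (fun r => pvKeyOf r == k) = d.filter (fun r => pvKeyOf r == k) := by
      intro k hk
      have hkd : k ∈ d.map pvKeyOf := (PySem.Set.mem_ofList _ _).mp hk
      obtain ⟨r0, hr0, rfl⟩ := List.mem_map.mp hkd
      have hkx : pvKeyOf r0 ≠ pvKeyOf x := hd r0 hr0
      rw [← htd, List.filter_cons]
      simp only [beq_iff_eq]
      rw [if_neg (by simpa using fun he => hkx he.symm), List.filter_append,
        List.filter_eq_nil_iff.mpr (fun a ha => by
          simp only [beq_iff_eq]
          rw [ht a ha]
          exact fun he => hkx (by simp [he.symm]))]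
      simp
    rw [List.map_congr_left hfilt2, ← ih hpd, pvRuns]

lemma pvAgg_append_ne (t : List (List (String × String))) (x : List (String × String))
    (k' : PvK) (hne : pvKeyOf x ≠ k') : pvAgg (t ++ [x]) k' = pvAgg t k' := by
  unfold pvAgg
  rw [List.filter_append]
  simp [hne]

lemma pvAgg_append_eq (t : List (List (String × String))) (x : List (String × String)) :
    pvAgg (t ++ [x]) (pvKeyOf x) = pvUpd (pvAgg t (pvKeyOf x)) x := by
  unfold pvAgg
  rw [List.filter_append, List.foldl_append]
  simp

lemma pvOfList_append_one (l : List PvK) (a : PvK) :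
    PySem.Set.ofList (l ++ [a]) = PySem.Set.add (PySem.Set.ofList l) a := by
  rw [PySem.Set.ofList_eq_foldl, List.foldl_append, List.foldl_cons, List.foldl_nil,
    ← PySem.Set.ofList_eq_foldl]

set_option maxHeartbeats 1000000 in
lemma pvItemsA (l : List (List (String × String))) :
    (l.foldl pvStepA PySem.Dict.empty).items
      = (PySem.Set.ofList (l.map pvKeyOf)).map (fun k => (k, pvAgg l k)) := by
  induction l using List.reverseRecOn with
  | nil => rfl
  | append_singleton t x ih =>
    rw [List.foldl_append, List.foldl_cons, List.foldl_nil, pvStepA_eq]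
    have hkeys : (t.foldl pvStepA PySem.Dict.empty).keys = PySem.Set.ofList (t.map pvKeyOf) := by
      show (t.foldl pvStepA PySem.Dict.empty).items.map (·.1) = _
      rw [ih, List.map_map]
      simp [Function.comp_def]
    have hnodup : (t.foldl pvStepA PySem.Dict.empty).keys.Nodup := by
      rw [hkeys]; exact PySem.Set.nodup_ofList _
    have hmapkeys : (t ++ [x]).map pvKeyOf = t.map pvKeyOf ++ [pvKeyOf x] := by simp
    by_cases hmem : pvKeyOf x ∉ t.map pvKeyOf
    · -- new key: appended
      have hcont : (t.foldl pvStepA PySem.Dict.empty).contains (pvKeyOf x) = false := by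
        rw [PySem.Dict.contains_eq_decide_mem_keys, hkeys]
        simpa [PySem.Set.mem_ofList] using hmem
      rw [PySem.Dict.items_insert_of_not_contains _ _ hcont, ih,
        PySem.Dict.getD_of_not_contains _ _ hcont, hmapkeys, pvOfList_append_one,
        PySem.Set.add_of_not_mem (by simpa [PySem.Set.mem_ofList] using hmem), List.map_append]
      refine congrArg₂ (· ++ ·) ?_ ?_
      · apply List.map_congr_left
        intro k' hk'
        have hk'm : k' ∈ t.map pvKeyOf := (PySem.Set.mem_ofList _ _).mp hk'
        have hne : pvKeyOf x ≠ k' := fun he => hmem (he ▸ hk'm)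
        rw [pvAgg_append_ne t x k' hne]
      · have hfilt : t.filter (fun r => pvKeyOf r == pvKeyOf x) = [] := by
          rw [List.filter_eq_nil_iff]
          intro a ha hc
          exact hmem (List.mem_map.mpr ⟨a, ha, beq_iff_eq.mp hc⟩)
        simp only [List.map_cons, List.map_nil]
        rw [pvAgg_append_eq]
        unfold pvAgg
        rw [hfilt]
        rfl
    · -- existing key: replaced in place
      rw [Classical.not_not] at hmem
      have hcont : (t.foldl pvStepA PySem.Dict.empty).contains (pvKeyOf x) = true := by
        rw [PySem.Dict.contains_eq_decide_mem_keys, hkeys]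
        simpa [PySem.Set.mem_ofList] using hmem
      have hentry : (pvKeyOf x, pvAgg t (pvKeyOf x)) ∈ (t.foldl pvStepA PySem.Dict.empty).items := by
        rw [ih]
        exact List.mem_map.mpr ⟨pvKeyOf x, (PySem.Set.mem_ofList _ _).mpr hmem, rfl⟩
      have hgetD := PySem.Dict.getD_of_mem_items _ hentry hnodup (pvInit (pvKeyOf x))
      rw [PySem.Dict.items_insert_of_contains _ _ hcont, hgetD, ih, List.map_map, hmapkeys, pvOfList_append_one,
        PySem.Set.add_of_mem (by simpa [PySem.Set.mem_ofList] using hmem)]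
      apply List.map_congr_left
      intro k' hk'
      simp only [Function.comp_def]
      rcases hkk : decide (k' = pvKeyOf x) with _ | _
      · have hne : k' ≠ pvKeyOf x := of_decide_eq_false hkk
        simp only [beq_iff_eq, if_neg hne]
        rw [pvAgg_append_ne t x k' (fun he => hne he.symm)]
      · have heq : k' = pvKeyOf x := of_decide_eq_true hkk
        subst heq
        simp [pvAgg_append_eq]

lemma pvGroups_eq_runs (srows : List (List (String × String))) :
    (let st := srows.foldl pvFlushStep ([], [])
     st.1 ++ (if st.2.isEmpty then [] else [st.2])) = pvRuns srows := by
  cases srows with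
  | nil => simp [pvRuns]
  | cons y ys =>
    rw [List.foldl_cons]
    have hstep : pvFlushStep ([], []) y = ([], [y]) := rfl
    rw [hstep]
    have := pvFlushFold ys [] y []
    simp only [List.nil_append] at this ⊢
    rw [this, pvRuns]

lemma pvHeadD_filter (l : List (List (String × String))) (k : PvK)
    (h : k ∈ l.map pvKeyOf) :
    pvKeyOf ((l.filter (fun r => pvKeyOf r == k)).headD []) = k := by
  rcases hf : l.filter (fun r => pvKeyOf r == k) with _ | ⟨r0, rest⟩
  · obtain ⟨r, hr, hrk⟩ := List.mem_map.mp h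
    have : r ∈ l.filter (fun r => pvKeyOf r == k) := by
      rw [List.mem_filter]
      exact ⟨hr, by simp [hrk]⟩
    rw [hf] at this
    simp at this
  · have : r0 ∈ l.filter (fun r => pvKeyOf r == k) := by rw [hf]; simp
    have := (List.mem_filter.mp this).2
    simpa using this

-- ===== VERDICT (by name: the statement is the Claim_ definition above) =====
theorem counts_rows_py_spec : Claim_equal_counts_rows_py := by
  intro rows _
  show counts_rows_py rows = counts_rows_py_alt rows
  unfold counts_rows_py counts_rows_py_alt
  dsimp only
  set F : PvK → PvBucket := fun k => pvBucketOf k (rows.filter (fun r => pvKeyOf r == k)) with hF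
  set srows := PySem.List.sorted rows (fun r => pvLex4 (pvKeyOf r)) false with hsrows
  have hperm : srows.Perm rows := PySem.List.sorted_perm rows _ false
  -- A's bucket list
  have hvals : (rows.foldl pvStepA PySem.Dict.empty).values
      = (PySem.Set.ofList (rows.map pvKeyOf)).map F := by
    show (rows.foldl pvStepA PySem.Dict.empty).items.map (·.2) = _
    rw [pvItemsA, List.map_map]
    apply List.map_congr_left
    intro k _
    simp only [Function.comp_def, hF]
    exact pvAgg_eq rows k
  -- B's bucket list
  have hgroups := pvGroups_eq_runs srows
  dsimp only at hgroups
  rw [hvals, hgroups, pvRuns_spec srows (PySem.List.sorted_pairwise rows _), List.map_map]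
  have hbuckets : ((PySem.Set.ofList (srows.map pvKeyOf)).map
        ((fun grp => pvBucketOf (pvKeyOf (grp.headD [])) grp) ∘ fun k => srows.filter (fun r => pvKeyOf r == k)))
      = (PySem.Set.ofList (srows.map pvKeyOf)).map F := by
    apply List.map_congr_left
    intro k hk
    have hkm : k ∈ srows.map pvKeyOf := (PySem.Set.mem_ofList _ _).mp hk
    simp only [Function.comp_def]
    rw [pvHeadD_filter srows k hkm, hF]
    exact pvBucketOf_perm k (hperm.filter _)
  rw [hbuckets]
  -- the two bucket lists are permutations of each other, and the final sort key is
  -- injective on them, so both sorts return the same list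
  have hKperm : (PySem.Set.ofList (srows.map pvKeyOf)).Perm (PySem.Set.ofList (rows.map pvKeyOf)) := by
    rw [List.perm_ext_iff_of_nodup (PySem.Set.nodup_ofList _) (PySem.Set.nodup_ofList _)]
    intro a
    rw [PySem.Set.mem_ofList, PySem.Set.mem_ofList]
    exact (hperm.map pvKeyOf).mem_iff
  have hinj : Function.Injective (fun k => pvSortKey (F k)) := by
    intro a b h
    simp only [hF, pvSortKey, pvBucketOf, pvLex4, toLex_inj, Prod.mk.injEq] at h
    obtain ⟨-, h1, h2, h3, h4⟩ := h
    exact Prod.ext h1 (Prod.ext h2 (Prod.ext h3 h4))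
  have hnodupB : (((PySem.Set.ofList (srows.map pvKeyOf)).map F).map pvSortKey).Nodup := by
    rw [List.map_map]
    exact List.Nodup.map hinj (PySem.Set.nodup_ofList _)
  have hsorted_eq : PySem.List.sorted ((PySem.Set.ofList (rows.map pvKeyOf)).map F) pvSortKey
      = PySem.List.sorted ((PySem.Set.ofList (srows.map pvKeyOf)).map F) pvSortKey := by
    apply PySem.List.sorted_eq_of_perm_of_pairwise_lt
    · exact (PySem.List.sorted_perm _ _ _).trans ((hKperm).map F)
    · have hle := PySem.List.sorted_pairwise ((PySem.Set.ofList (srows.map pvKeyOf)).map F) pvSortKey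
      have hndys : ((PySem.List.sorted ((PySem.Set.ofList (srows.map pvKeyOf)).map F) pvSortKey).map pvSortKey).Nodup := by
        rw [List.Perm.nodup_iff ((PySem.List.sorted_perm _ _ _).map pvSortKey)]
        exact hnodupB
      have hne : (PySem.List.sorted ((PySem.Set.ofList (srows.map pvKeyOf)).map F) pvSortKey).Pairwise
          (fun a b => pvSortKey a ≠ pvSortKey b) := by
        have := hndys
        rw [List.Nodup, List.pairwise_map] at this
        exact this
      exact (hle.and hne).imp (fun h => lt_of_le_of_ne h.1 h.2)
  rw [hsorted_eq]
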